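-- pv_equiv track=rewrite | github.com/vladkuznetsov2901/EvristicMethods_lab3 | main.py | max_load_processor
-- ===== SOURCE A (Python) =====
-- def max_load_processor(arr_processors: list):
--     _min = 0
--     index = 0
--     max_load_processor = sum(arr_processors[0])
--     for i in range(len(arr_processors)):
--         if sum(arr_processors[i]) > max_load_processor:
--             max_load_processor = sum(arr_processors[i])
--             index = i
--     return index
-- ===== SOURCE B (Python) =====
-- def max_load_processor(arr_processors: list):
--     sums = [sum(p) for p in arr_processors]
--     return sums.index(max(sums))
-- ===== Notes on version B (the rewrite author's own statement) =====
-- stated objective: simpler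
-- what changed: Replaces the interleaved running-max/index scan over indexed accesses with a build-the-table-then-argmax decomposition: compute all sublist sums once, then return the index of their maximum.
import Mathlib
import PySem

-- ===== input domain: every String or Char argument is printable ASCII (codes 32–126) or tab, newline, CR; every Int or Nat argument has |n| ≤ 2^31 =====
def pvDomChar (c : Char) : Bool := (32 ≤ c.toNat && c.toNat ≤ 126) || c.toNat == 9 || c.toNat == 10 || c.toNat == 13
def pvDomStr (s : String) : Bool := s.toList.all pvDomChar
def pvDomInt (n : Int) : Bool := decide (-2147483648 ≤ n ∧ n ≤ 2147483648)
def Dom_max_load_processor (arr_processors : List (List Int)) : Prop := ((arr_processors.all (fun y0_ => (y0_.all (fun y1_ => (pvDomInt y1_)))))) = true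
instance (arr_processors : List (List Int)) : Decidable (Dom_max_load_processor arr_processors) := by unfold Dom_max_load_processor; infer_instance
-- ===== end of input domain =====

-- B replaces A's interleaved running-max/index scan over indexed accesses with a simpler
-- build-the-sums-table-then-argmax decomposition; same return value on every non-empty input.


-- ===== PORT A =====
-- running-max scan over indices: state (max_load_processor, index); A's `_min` variable is unused and dropped
def max_load_processor (arr_processors : List (List Int)) : Int :=
  let init : Int := (PySem.List.pyGetD arr_processors 0 []).sum
  let st :=
    (PySem.List.pyRange 0 (PySem.List.len arr_processors) 1).foldl
      (fun (s : Int × Int) i =>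
        if (PySem.List.pyGetD arr_processors i []).sum > s.1 then
          ((PySem.List.pyGetD arr_processors i []).sum, i)
        else s)
      (init, 0)
  st.2

-- ===== PORT B =====
-- sums table, then argmax: sums.index(max(sums)); on [] Python B raises (excluded by Pre_), the getD 0 is never reached under Pre_
def max_load_processor_alt (arr_processors : List (List Int)) : Int :=
  let sums := arr_processors.map List.sum
  match PySem.List.max? sums (fun x => x) with
  | none => 0
  | some m => ((PySem.List.index? sums m).getD 0 : Nat)

-- ===== PRECONDITION & SPEC =====
-- Pre_ excludes only the empty list, on which A raises IndexError (and B raises ValueError).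
def Pre_max_load_processor (arr_processors : List (List Int)) : Prop := arr_processors.isEmpty = false
instance (arr_processors : List (List Int)) : Decidable (Pre_max_load_processor arr_processors) := by unfold Pre_max_load_processor; infer_instance
def pvWitness_max_load_processor : List (List Int) := [[1, 2], [5], [3, 3]]

def Spec_max_load_processor (arr_processors : List (List Int)) (out : Int) : Prop := out = max_load_processor_alt arr_processors
instance (arr_processors : List (List Int)) (out : Int) : Decidable (Spec_max_load_processor arr_processors out) := by unfold Spec_max_load_processor; infer_instance

-- ===== CLAIM (what is proved, stated in full; the proofs are below) =====
def Claim_equal_max_load_processor : Prop := ∀ (arr_processors : List (List Int)), Dom_max_load_processor arr_processors → Pre_max_load_processor arr_processors → Spec_max_load_processor arr_processors (max_load_processor arr_processors)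

-- ===== LEMMAS AND PROOFS =====

-- A's scan over (index, element) pairs: final max is the running max of the key values over
-- the seed m, final index is the position of the first occurrence of that max if it beats
-- the seed, else the seed index j.
theorem scan_characterisation {α : Type} (v : α → Int) :
    ∀ (t : List α) (k m j : Int),
      ((PySem.List.enumerate t k).foldl
        (fun (s : Int × Int) p => if v p.2 > s.1 then (v p.2, p.1) else s) (m, j))
      = ((t.map v).foldl max m,
         if m < (t.map v).foldl max m then k + (((t.map v).idxOf ((t.map v).foldl max m) : Nat) : Int) else j) := by
  intro t
  induction t with
  | nil => intro k m j; simp [PySem.List.enumerate_nil]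
  | cons x t ih =>
    intro k m j
    rw [PySem.List.enumerate_cons]
    simp only [List.foldl_cons, List.map_cons]
    by_cases hx : v x > m
    · rw [if_pos hx, ih]
      have hmx : max m (v x) = v x := by omega
      rw [hmx]
      have hle := (PySem.List.le_foldl_max (t.map v) (v x)).1
      by_cases h2 : v x < (t.map v).foldl max (v x)
      · have hmem : (t.map v).foldl max (v x) ∈ t.map v := by
          rcases PySem.List.foldl_max_mem (t.map v) (v x) with h | h
          · omega
          · exact h
        have hne : v x ≠ (t.map v).foldl max (v x) := by omega
        rw [if_pos h2, if_pos (by omega : m < (t.map v).foldl max (v x)),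
            List.idxOf_cons_ne _ hne]
        simp only [Prod.mk.injEq, Nat.succ_eq_add_one, true_and]
        push_cast
        omega
      · have heq : (t.map v).foldl max (v x) = v x := by omega
        rw [if_neg h2, heq, if_pos (by omega : m < v x), List.idxOf_cons_self]
        simp
    · rw [if_neg hx, ih]
      have hmx : max m (v x) = m := by omega
      rw [hmx]
      by_cases h2 : m < (t.map v).foldl max m
      · have hne : v x ≠ (t.map v).foldl max m := by omega
        rw [if_pos h2, if_pos h2, List.idxOf_cons_ne _ hne]
        simp only [Prod.mk.injEq, Nat.succ_eq_add_one, true_and]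
        push_cast
        omega
      · rw [if_neg h2, if_neg h2]

-- B's sums.index(m) for a member m is List.idxOf
theorem index?_getD_of_mem (l : List Int) (x : Int) (h : x ∈ l) :
    (PySem.List.index? l x).getD 0 = l.idxOf x := by
  have hs : (PySem.List.index? l x).isSome := (PySem.List.index?_isSome_iff l x).mpr h
  obtain ⟨k, hk⟩ := Option.isSome_iff_exists.mp hs
  rw [PySem.List.index?_eq_idxOf?] at hk
  rw [List.idxOf_eq_getD_idxOf?, PySem.List.index?_eq_idxOf?, hk]
  simp

-- ===== VERDICT (by name: the statement is the Claim_ definition above) =====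
theorem max_load_processor_spec : Claim_equal_max_load_processor := by
  intro arr _ hpre
  unfold Spec_max_load_processor
  have hne : arr ≠ [] := by
    unfold Pre_max_load_processor at hpre
    simpa using hpre
  obtain ⟨a, rest, rfl⟩ := List.exists_cons_of_ne_nil hne
  unfold max_load_processor max_load_processor_alt
  have h1 := scan_characterisation List.sum (a :: rest) 0 ((PySem.List.pyGetD (a :: rest) 0 ([] : List Int)).sum) 0
  rw [PySem.List.enumerate_eq_map_pyRange (a :: rest) ([] : List Int), List.foldl_map] at h1
  dsimp only at h1
  simp only [PySem.List.len_eq] at h1 ⊢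
  rw [h1]
  dsimp only
  rw [PySem.List.pyGetD_zero_cons]
  simp only [List.map_cons, List.foldl_cons, max_self]
  rw [PySem.List.max?_id_cons]
  set rs := rest.map List.sum with hrs
  set M := rs.foldl max a.sum with hM
  have hmem : M ∈ a.sum :: rs := by
    rcases PySem.List.foldl_max_mem rs a.sum with h' | h'
    · rw [hM, h']; exact List.mem_cons_self
    · exact List.mem_cons_of_mem _ h'
  have hle : a.sum ≤ M := (PySem.List.le_foldl_max rs a.sum).1
  simp only [index?_getD_of_mem _ _ hmem]
  by_cases hc : a.sum < M
  · rw [if_pos hc]; ring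
  · rw [if_neg hc]
    have : M = a.sum := by omega
    rw [this, List.idxOf_cons_self]
    simp
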